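-- pv_equiv track=rewrite | github.com/primrose101/CS322 | finite_state_machines/keywords.py | kwvar_fsm
-- ===== SOURCE A (Python) =====
-- def kwvar_fsm(string_input, index):
--     i = index
--
--     table = [
--         [1, 4, 4, 4],
--         [4, 2, 4, 4],
--         [4, 4, 3, 4],
--         [4, 4, 4, 4],
--         [4, 4, 4, 4],
--     ]
--
--     state = 0
--     inputstate = 0
--
--     string_length = len(string_input)
--
--     while i != string_length:
--         if string_input[i] == 'V':
--             inputstate = 0
--         elif string_input[i] == 'A':
--             inputstate = 1
--         elif string_input[i] == 'R':
--             inputstate = 2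
--         else:
--             inputstate = 3
--
--         state = table[state][inputstate]
--
--         if state == 4:
--             break
--
--         i += 1
--
--     return i - index
-- ===== SOURCE B (Python) =====
-- def kwvar_fsm(string_input, index):
--     n = len(string_input)
--     if index != n and string_input[index] == 'V':
--         if index + 1 != n and string_input[index + 1] == 'A':
--             if index + 2 != n and string_input[index + 2] == 'R':
--                 return 3
--             return 2
--         return 1
--     return 0
-- ===== Notes on version B (the rewrite author's own statement) =====
-- stated objective: simpler
-- what changed: Replaces the while-loop driven by a 5x4 FSM transition table and a 4-way character classification with three direct bounds-checked character comparisons against 'V','A','R' (no loop, no table, no state variables).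
import Mathlib
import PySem

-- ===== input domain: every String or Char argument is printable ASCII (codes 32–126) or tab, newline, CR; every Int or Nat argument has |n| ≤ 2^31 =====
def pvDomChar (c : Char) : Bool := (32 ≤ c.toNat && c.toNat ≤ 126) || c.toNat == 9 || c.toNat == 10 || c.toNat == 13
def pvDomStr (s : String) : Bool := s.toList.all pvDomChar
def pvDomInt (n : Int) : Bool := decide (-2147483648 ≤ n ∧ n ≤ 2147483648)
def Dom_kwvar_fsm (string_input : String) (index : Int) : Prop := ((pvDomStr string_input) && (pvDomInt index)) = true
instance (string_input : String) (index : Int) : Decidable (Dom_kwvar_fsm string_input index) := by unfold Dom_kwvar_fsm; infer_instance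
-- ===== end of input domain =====

-- B replaces A's while-loop over a 5×4 FSM transition table by three direct bounds-checked character comparisons (no loop, no table); objective: simpler.

-- ===== PORT A =====
-- the transition table of A, verbatim
def kwvarTable : List (List Int) := [[1, 4, 4, 4], [4, 2, 4, 4], [4, 4, 3, 4], [4, 4, 4, 4], [4, 4, 4, 4]]

-- A's while-loop. On ANY input the body runs at most 4 times (the state strictly increases
-- to 4, whose table row is all 4s, and then breaks), so fuel 5 is a pure totality guard,
-- not a change of algorithm. The `none` branch of pyGet? is where Python raises IndexError
-- (excluded by Pre_).
def kwvar_fsm_loop (s : String) (slen index : Int) (fuel : Nat) (i state : Int) : Int :=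
  match fuel with
  | 0 => i - index
  | Nat.succ fuel' =>
    if i = slen then i - index
    else
      match PySem.Str.pyGet? s i with
      | none => i - index
      | some c =>
        let inputstate : Int := if c = 'V' then 0 else if c = 'A' then 1 else if c = 'R' then 2 else 3
        let state' : Int := (kwvarTable.getD state.toNat []).getD inputstate.toNat 4
        if state' = 4 then i - index
        else kwvar_fsm_loop s slen index fuel' (i + 1) state'

def kwvar_fsm (string_input : String) (index : Int) : Int :=
  kwvar_fsm_loop string_input (PySem.Str.len string_input) index 5 index 0

-- ===== PORT B =====
def kwvar_fsm_alt (string_input : String) (index : Int) : Int :=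
  let n : Int := PySem.Str.len string_input
  if index ≠ n ∧ PySem.Str.pyGet? string_input index = some 'V' then
    if index + 1 ≠ n ∧ PySem.Str.pyGet? string_input (index + 1) = some 'A' then
      if index + 2 ≠ n ∧ PySem.Str.pyGet? string_input (index + 2) = some 'R' then 3 else 2
    else 1
  else 0

-- ===== PRECONDITION & SPEC =====
-- Pre_ excludes exactly the inputs on which Python A raises IndexError (index > len(string_input)
-- or index < -len(string_input)); B raises the same IndexError there.
def Pre_kwvar_fsm (string_input : String) (index : Int) : Prop :=
  -(PySem.Str.len string_input) ≤ index ∧ index ≤ PySem.Str.len string_input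
instance (string_input : String) (index : Int) : Decidable (Pre_kwvar_fsm string_input index) := by unfold Pre_kwvar_fsm; infer_instance

def pvWitness_kwvar_fsm : String × Int := ("xVARy", 1)

def Spec_kwvar_fsm (string_input : String) (index : Int) (out : Int) : Prop := out = kwvar_fsm_alt string_input index
instance (string_input : String) (index : Int) (out : Int) : Decidable (Spec_kwvar_fsm string_input index out) := by unfold Spec_kwvar_fsm; infer_instance

-- ===== CLAIM (what is proved, stated in full; the proofs are below) =====
def Claim_equal_kwvar_fsm : Prop := ∀ (string_input : String) (index : Int), Dom_kwvar_fsm string_input index → Pre_kwvar_fsm string_input index → Spec_kwvar_fsm string_input index (kwvar_fsm string_input index)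

-- ===== LEMMAS AND PROOFS =====

-- one iteration of A's loop when the guarded access succeeds
theorem kwvar_step (s : String) (slen index : Int) (fuel : Nat) (i state : Int) (c : Char)
    (hne : ¬ i = slen) (hc : PySem.Str.pyGet? s i = some c) :
    kwvar_fsm_loop s slen index (fuel + 1) i state =
      (if (kwvarTable.getD state.toNat []).getD (if c = 'V' then (0:Int) else if c = 'A' then 1 else if c = 'R' then 2 else 3).toNat 4 = 4
       then i - index
       else kwvar_fsm_loop s slen index fuel (i + 1)
              ((kwvarTable.getD state.toNat []).getD (if c = 'V' then (0:Int) else if c = 'A' then 1 else if c = 'R' then 2 else 3).toNat 4)) := by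
  simp only [kwvar_fsm_loop, if_neg hne, hc]

-- A's loop exits returning i - index when i reaches len(s)
theorem kwvar_stop (s : String) (slen index : Int) (fuel : Nat) (i state : Int)
    (hi : i = slen) : kwvar_fsm_loop s slen index (fuel + 1) i state = i - index := by
  simp only [kwvar_fsm_loop, if_pos hi]

-- specialised steps: matching 'V'/'A'/'R' advances the state 0 -> 1 -> 2 -> 3
theorem kwvar_stepV (s : String) (slen index : Int) (fuel : Nat) (i : Int)
    (hne : ¬ i = slen) (hc : PySem.Str.pyGet? s i = some 'V') :
    kwvar_fsm_loop s slen index (fuel + 1) i 0 = kwvar_fsm_loop s slen index fuel (i + 1) 1 := by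
  rw [kwvar_step s slen index fuel i 0 'V' hne hc]; simp [kwvarTable]

theorem kwvar_stepA (s : String) (slen index : Int) (fuel : Nat) (i : Int)
    (hne : ¬ i = slen) (hc : PySem.Str.pyGet? s i = some 'A') :
    kwvar_fsm_loop s slen index (fuel + 1) i 1 = kwvar_fsm_loop s slen index fuel (i + 1) 2 := by
  rw [kwvar_step s slen index fuel i 1 'A' hne hc]; simp [kwvarTable]

theorem kwvar_stepR (s : String) (slen index : Int) (fuel : Nat) (i : Int)
    (hne : ¬ i = slen) (hc : PySem.Str.pyGet? s i = some 'R') :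
    kwvar_fsm_loop s slen index (fuel + 1) i 2 = kwvar_fsm_loop s slen index fuel (i + 1) 3 := by
  rw [kwvar_step s slen index fuel i 2 'R' hne hc]; simp [kwvarTable]

-- specialised breaks: a non-matching character (or any character in state 3) sends the state to 4
theorem kwvar_break0 (s : String) (slen index : Int) (fuel : Nat) (i : Int) (c : Char)
    (hne : ¬ i = slen) (hc : PySem.Str.pyGet? s i = some c) (hv : ¬ c = 'V') :
    kwvar_fsm_loop s slen index (fuel + 1) i 0 = i - index := by
  rw [kwvar_step s slen index fuel i 0 c hne hc]
  by_cases ha : c = 'A' <;> by_cases hr : c = 'R' <;> simp [kwvarTable, hv, ha, hr]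

theorem kwvar_break1 (s : String) (slen index : Int) (fuel : Nat) (i : Int) (c : Char)
    (hne : ¬ i = slen) (hc : PySem.Str.pyGet? s i = some c) (ha : ¬ c = 'A') :
    kwvar_fsm_loop s slen index (fuel + 1) i 1 = i - index := by
  rw [kwvar_step s slen index fuel i 1 c hne hc]
  by_cases hv : c = 'V' <;> by_cases hr : c = 'R' <;> simp [kwvarTable, hv, ha, hr]

theorem kwvar_break2 (s : String) (slen index : Int) (fuel : Nat) (i : Int) (c : Char)
    (hne : ¬ i = slen) (hc : PySem.Str.pyGet? s i = some c) (hr : ¬ c = 'R') :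
    kwvar_fsm_loop s slen index (fuel + 1) i 2 = i - index := by
  rw [kwvar_step s slen index fuel i 2 c hne hc]
  by_cases hv : c = 'V' <;> by_cases ha : c = 'A' <;> simp [kwvarTable, hv, ha, hr]

theorem kwvar_break3 (s : String) (slen index : Int) (fuel : Nat) (i : Int) (c : Char)
    (hne : ¬ i = slen) (hc : PySem.Str.pyGet? s i = some c) :
    kwvar_fsm_loop s slen index (fuel + 1) i 3 = i - index := by
  rw [kwvar_step s slen index fuel i 3 c hne hc]
  by_cases hv : c = 'V' <;> by_cases ha : c = 'A' <;> by_cases hr : c = 'R' <;>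
    simp [kwvarTable, hv, ha, hr]

-- inside the admitted range, an access guarded by `i != len` succeeds
theorem kwvar_get_isSome (s : String) (i : Int) (h1 : -(PySem.Str.len s) <= i)
    (h2 : i < PySem.Str.len s) : ∃ c, PySem.Str.pyGet? s i = some c := by
  rw [PySem.Str.len_eq] at h1 h2
  rw [PySem.Str.pyGet?_eq, PySem.Chars.pyGet?_eq_listPyGet?]
  rcases (by omega : 0 <= i ∨ i < 0) with hpos | hneg
  · have hlt : i.toNat < s.toList.length := by omega
    exact ⟨s.toList[i.toNat],
      by simp [PySem.List.pyGet?_of_nonneg s.toList hpos, List.getElem?_eq_getElem hlt]⟩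
  · obtain ⟨k, hki⟩ : ∃ k : Nat, i = -(k:Int) := ⟨(-i).toNat, by omega⟩
    subst hki
    have hlt : s.toList.length - k < s.toList.length := by omega
    exact ⟨s.toList[s.toList.length - k],
      by rw [PySem.List.pyGet?_neg_natCast s.toList k (by omega) (by omega)]
         simp⟩

theorem kwvar_fsm_spec_aux (s : String) (index : Int)
    (h1 : -(PySem.Str.len s) <= index) (h2 : index <= PySem.Str.len s) :
    kwvar_fsm s index = kwvar_fsm_alt s index := by
  unfold kwvar_fsm kwvar_fsm_alt
  set n := PySem.Str.len s with hn
  by_cases he0 : index = n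
  · rw [kwvar_stop s n index 4 index 0 he0]
    simp [he0]
  · obtain ⟨c0, hc0⟩ := kwvar_get_isSome s index h1 (by omega)
    have hc0' := hc0; rw [PySem.Str.pyGet?_eq, PySem.Chars.pyGet?_eq_listPyGet?] at hc0'
    by_cases hV : c0 = 'V'
    · subst hV
      rw [kwvar_stepV s n index 4 index he0 hc0]
      by_cases he1 : index + 1 = n
      · rw [kwvar_stop s n index 3 (index + 1) 1 he1]
        simp [he0, he1, hc0']
        try omega
      · obtain ⟨c1, hc1⟩ := kwvar_get_isSome s (index + 1) (by omega) (by omega)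
        have hc1' := hc1; rw [PySem.Str.pyGet?_eq, PySem.Chars.pyGet?_eq_listPyGet?] at hc1'
        by_cases hA : c1 = 'A'
        · subst hA
          rw [kwvar_stepA s n index 3 (index + 1) he1 hc1]
          rw [show index + 1 + 1 = index + 2 from by ring]
          by_cases he2 : index + 2 = n
          · rw [kwvar_stop s n index 2 (index + 2) 2 he2]
            simp [he0, he1, he2, hc0', hc1']
            try omega
          · obtain ⟨c2, hc2⟩ := kwvar_get_isSome s (index + 2) (by omega) (by omega)
            have hc2' := hc2; rw [PySem.Str.pyGet?_eq, PySem.Chars.pyGet?_eq_listPyGet?] at hc2'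
            by_cases hR : c2 = 'R'
            · subst hR
              rw [kwvar_stepR s n index 2 (index + 2) he2 hc2]
              rw [show index + 2 + 1 = index + 3 from by ring]
              by_cases he3 : index + 3 = n
              · rw [kwvar_stop s n index 1 (index + 3) 3 he3]
                simp [he0, he1, he2, hc0', hc1', hc2']
                try omega
              · obtain ⟨c3, hc3⟩ := kwvar_get_isSome s (index + 3) (by omega) (by omega)
                rw [kwvar_break3 s n index 1 (index + 3) c3 he3 hc3]
                simp [he0, he1, he2, hc0', hc1', hc2']
                try omega
            · rw [kwvar_break2 s n index 2 (index + 2) c2 he2 hc2 hR]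
              simp [he0, he1, he2, hc0', hc1', hc2', hR]
              try omega
        · rw [kwvar_break1 s n index 3 (index + 1) c1 he1 hc1 hA]
          simp [he0, he1, hc0', hc1', hA]
          try omega
    · rw [kwvar_break0 s n index 4 index c0 he0 hc0 hV]
      simp [hc0', hV]

-- ===== VERDICT (by name: the statement is the Claim_ definition above) =====
theorem kwvar_fsm_spec : Claim_equal_kwvar_fsm := by
  intro s index _ hpre
  exact kwvar_fsm_spec_aux s index hpre.1 hpre.2
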